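-- pv_equiv track=rewrite | github.com/yousunlotif-bappy/ElectraMind | backend/simulator.py | calculate_fptp
-- ===== SOURCE A (Python) =====
-- from collections import Counter
--
-- def calculate_fptp(ballots, candidates):
--     first_choices = []
--
--     for ballot in ballots:
--         if ballot:
--             first_choices.append(ballot[0])
--
--     vote_count = Counter(first_choices)
--     votes = {candidate: vote_count.get(candidate, 0) for candidate in candidates}
--     winner = max(votes, key=votes.get)
--
--     return winner, votes
-- ===== SOURCE B (Python) =====
-- def calculate_fptp(ballots, candidates):
--     heads = sorted(b[0] for b in ballots if b)
--     tally = {}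
--     prev = None
--     count = 0
--     for h in heads:
--         if h == prev:
--             count += 1
--         else:
--             if prev is not None:
--                 tally[prev] = count
--             prev = h
--             count = 1
--     if prev is not None:
--         tally[prev] = count
--     votes = {c: tally.get(c, 0) for c in candidates}
--     winner = max(votes, key=votes.get)
--     return winner, votes
-- ===== Notes on version B (the rewrite author's own statement) =====
-- stated objective: alternative
-- what changed: Replaced the Counter-based tally with a sort-then-scan algorithm: B sorts the first choices and computes each candidate's vote total by run-length counting adjacent equal elements in one linear scan, instead of hashing every first choice into a Counter and projecting it onto the candidates.
import Mathlib
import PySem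

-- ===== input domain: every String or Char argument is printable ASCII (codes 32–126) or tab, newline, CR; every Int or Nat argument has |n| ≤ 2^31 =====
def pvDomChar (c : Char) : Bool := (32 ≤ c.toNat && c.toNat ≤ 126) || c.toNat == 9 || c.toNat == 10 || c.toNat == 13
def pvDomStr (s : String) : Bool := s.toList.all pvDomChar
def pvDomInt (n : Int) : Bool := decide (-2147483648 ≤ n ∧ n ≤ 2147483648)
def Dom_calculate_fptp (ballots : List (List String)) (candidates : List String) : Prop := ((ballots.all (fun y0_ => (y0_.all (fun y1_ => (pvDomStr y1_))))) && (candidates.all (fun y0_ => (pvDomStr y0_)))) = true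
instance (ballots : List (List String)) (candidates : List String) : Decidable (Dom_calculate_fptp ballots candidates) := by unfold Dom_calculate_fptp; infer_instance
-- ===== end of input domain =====

-- B replaces A's Counter tally by sort-then-scan: sort the first choices, then run-length
-- count adjacent equal elements in one linear pass (objective: alternative algorithm).


-- ===== PORT A =====
def calculate_fptp (ballots : List (List String)) (candidates : List String) : String × (List (String × Int)) :=
  -- first_choices = []; for ballot in ballots: if ballot: first_choices.append(ballot[0])
  let first_choices : List String :=
    ballots.foldl (fun acc ballot => if ballot ≠ [] then acc ++ [ballot.headD ""] else acc) []
  -- vote_count = Counter(first_choices)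
  let vote_count : PySem.Dict String Int := PySem.Dict.counter first_choices
  -- votes = {candidate: vote_count.get(candidate, 0) for candidate in candidates}
  let votes : PySem.Dict String Int :=
    candidates.foldl (fun d c => d.insert c (vote_count.getD c 0)) PySem.Dict.empty
  -- winner = max(votes, key=votes.get)  (raises ValueError iff votes is empty: excluded by Pre_)
  let winner : String := (PySem.List.max? votes.keys (fun c => votes.getD c 0)).getD ""
  (winner, votes.items)

-- ===== PORT B =====
-- B's run-length loop over the sorted heads, with its final flush:
-- for h in heads: if h == prev: count += 1 else: (flush prev) ; prev, count = h, 1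
-- then a last flush of prev.
def pvRunsGo (xs : List String) (tally : PySem.Dict String Int) (prev : Option String) (count : Int) : PySem.Dict String Int :=
  match xs with
  | [] =>
      match prev with
      | none => tally
      | some p => tally.insert p count
  | h :: t =>
      if some h = prev then pvRunsGo t tally prev (count + 1)
      else
        match prev with
        | none => pvRunsGo t tally (some h) 1
        | some p => pvRunsGo t (tally.insert p count) (some h) 1

def calculate_fptp_alt (ballots : List (List String)) (candidates : List String) : String × (List (String × Int)) :=
  -- heads = sorted(b[0] for b in ballots if b)
  let heads : List String :=
    PySem.List.sorted
      (ballots.foldl (fun acc b => if b ≠ [] then acc ++ [b.headD ""] else acc) [])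
      (fun x => x) false
  -- the run-length scan building tally
  let tally : PySem.Dict String Int := pvRunsGo heads PySem.Dict.empty none 0
  -- votes = {c: tally.get(c, 0) for c in candidates}
  let votes : PySem.Dict String Int :=
    candidates.foldl (fun d c => d.insert c (tally.getD c 0)) PySem.Dict.empty
  -- winner = max(votes, key=votes.get)  (raises ValueError iff votes is empty: excluded by Pre_)
  let winner : String := (PySem.List.max? votes.keys (fun c => votes.getD c 0)).getD ""
  (winner, votes.items)

-- ===== PRECONDITION & SPEC =====
-- Pre_ excludes only candidates = [], where Python's max over the empty dict raises ValueError (in A and in B alike).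
def Pre_calculate_fptp (ballots : List (List String)) (candidates : List String) : Prop := candidates ≠ []
instance (ballots : List (List String)) (candidates : List String) : Decidable (Pre_calculate_fptp ballots candidates) := by unfold Pre_calculate_fptp; infer_instance

def pvWitness_calculate_fptp : List (List String) × List String :=
  ([["a"], ["b", "a"], [], ["a"], ["z"]], ["a", "b", "c"])

def Spec_calculate_fptp (ballots : List (List String)) (candidates : List String) (out : String × (List (String × Int))) : Prop := out = calculate_fptp_alt ballots candidates
instance (ballots : List (List String)) (candidates : List String) (out : String × (List (String × Int))) : Decidable (Spec_calculate_fptp ballots candidates out) := by unfold Spec_calculate_fptp; infer_instance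

-- ===== CLAIM (what is proved, stated in full; the proofs are below) =====
def Claim_equal_calculate_fptp : Prop := ∀ (ballots : List (List String)) (candidates : List String), Dom_calculate_fptp ballots candidates → Pre_calculate_fptp ballots candidates → Spec_calculate_fptp ballots candidates (calculate_fptp ballots candidates)

-- ===== LEMMAS AND PROOFS =====

-- A's first loop collects the heads of the nonempty ballots.
theorem pvFirstChoices_eq (ballots : List (List String)) (acc : List String) :
    ballots.foldl (fun acc ballot => if ballot ≠ [] then acc ++ [ballot.headD ""] else acc) acc
      = acc ++ ballots.filterMap List.head? := by
  induction ballots generalizing acc with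
  | nil => simp
  | cons b bs ih =>
      rw [List.foldl_cons]
      cases b with
      | nil => rw [if_neg (by simp), ih]; simp
      | cons x t => rw [if_pos (by simp), ih]; simp

-- The run-length scan on a non-decreasing list tallies exactly the multiplicities:
-- for a sorted remainder xs and a current run (prev, count) preceding it,
-- each key c ends up with its total count; untouched keys keep their old value.
theorem pvRunsGo_getD (xs : List String) (d : PySem.Dict String Int)
    (prev : Option String) (cnt : Int) (c : String)
    (hs : xs.Pairwise (· ≤ ·))
    (hp : ∀ p, prev = some p → ∀ x ∈ xs, p ≤ x) :
    (pvRunsGo xs d prev cnt).getD c 0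
      = if prev = some c ∨ c ∈ xs then (if prev = some c then cnt else 0) + (xs.count c : Int)
        else d.getD c 0 := by
  induction xs generalizing d prev cnt with
  | nil =>
      cases prev with
      | none => simp [pvRunsGo]
      | some p =>
          by_cases hc : p = c
          · subst hc; simp [pvRunsGo, PySem.Dict.getD_insert]
          · have h1 : ¬ c = p := fun h => hc h.symm
            have h2 : ¬ some p = some c := fun h => hc (Option.some.inj h)
            simp [pvRunsGo, PySem.Dict.getD_insert, h1, h2]
  | cons x t ih =>
      have hst : t.Pairwise (· ≤ ·) := (List.pairwise_cons.mp hs).2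
      have hxt : ∀ y ∈ t, x ≤ y := (List.pairwise_cons.mp hs).1
      cases prev with
      | none =>
          rw [show pvRunsGo (x :: t) d none cnt = pvRunsGo t d (some x) 1 from by
            simp [pvRunsGo]]
          rw [ih d (some x) 1 hst (by intro p hp' y hy; cases Option.some.inj hp'; exact hxt y hy)]
          by_cases hcx : c = x
          · subst hcx
            simp [List.count_cons]
            ring
          · have h1 : ¬ x = c := fun h => hcx h.symm
            have h2 : ¬ some x = some c := fun h => hcx (Option.some.inj h).symm
            by_cases hct : c ∈ t <;> simp [h1, h2, hcx, hct, List.count_cons]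
      | some p =>
          by_cases hxp : x = p
          · subst hxp
            rw [show pvRunsGo (x :: t) d (some x) cnt = pvRunsGo t d (some x) (cnt + 1) from by
              simp [pvRunsGo]]
            rw [ih d (some x) (cnt + 1) hst (by intro p hp' y hy; cases Option.some.inj hp'; exact hxt y hy)]
            by_cases hcx : c = x
            · subst hcx
              simp [List.count_cons]
              ring
            · have h1 : ¬ x = c := fun h => hcx h.symm
              have h2 : ¬ some x = some c := fun h => hcx (Option.some.inj h).symm
              by_cases hct : c ∈ t <;> simp [h1, h2, hcx, hct, List.count_cons]
          · -- flush p, start a new run at x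
            have hpx : p ≤ x := hp p rfl x (List.mem_cons_self)
            have hplt : p < x := lt_of_le_of_ne hpx (fun h => hxp h.symm)
            have hpt : p ∉ t := fun hmem => absurd (hxt p hmem) (not_le.mpr hplt)
            have hspx : ¬ some x = some p := fun h => hxp (Option.some.inj h)
            rw [show pvRunsGo (x :: t) d (some p) cnt
                = pvRunsGo t (d.insert p cnt) (some x) 1 from by
              simp [pvRunsGo, hspx]]
            rw [ih (d.insert p cnt) (some x) 1 hst
              (by intro q hq y hy; cases Option.some.inj hq; exact hxt y hy)]
            by_cases hcx : c = x
            · subst hcx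
              have h3 : ¬ some p = some c := fun h => hxp (Option.some.inj h).symm
              have h4 : ¬ p = c := fun h => hxp h.symm
              simp [h3, h4, List.count_cons]
              ring
            · have h1 : ¬ x = c := fun h => hcx h.symm
              have h2 : ¬ some x = some c := fun h => hcx (Option.some.inj h).symm
              by_cases hcp : c = p
              · subst hcp
                have hct : c ∉ t := hpt
                have hzero : t.count c = 0 := List.count_eq_zero_of_not_mem hct
                simp [h1, h2, hcx, hct, PySem.Dict.getD_insert, List.count_cons, hzero]
              · have h3 : ¬ some p = some c := fun h => hcp (Option.some.inj h).symm
                have h4 : ¬ p = c := fun h => hcp h.symm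
                by_cases hct : c ∈ t <;>
                  simp [h1, h2, h3, h4, hcx, hcp, hct, PySem.Dict.getD_insert, List.count_cons]

-- B's tally looks up to the same value A's Counter produces for every candidate.
theorem pvValue_eq (ballots : List (List String)) (c : String) :
    (PySem.Dict.counter
        (ballots.foldl (fun acc ballot => if ballot ≠ [] then acc ++ [ballot.headD ""] else acc) [])).getD c 0
      = (pvRunsGo
          (PySem.List.sorted
            (ballots.foldl (fun acc b => if b ≠ [] then acc ++ [b.headD ""] else acc) [])
            (fun x => x) false)
          PySem.Dict.empty none 0).getD c 0 := by
  have hfc : ballots.foldl (fun acc ballot => if ballot ≠ [] then acc ++ [ballot.headD ""] else acc) []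
      = ballots.filterMap List.head? := by simpa using pvFirstChoices_eq ballots []
  rw [hfc, PySem.Dict.getD_counter]
  have hpair : (PySem.List.sorted (ballots.filterMap List.head?) (fun x => x) false).Pairwise (· ≤ ·) := by
    simpa using PySem.List.sorted_pairwise (ballots.filterMap List.head?) (fun x => x)
  rw [pvRunsGo_getD _ _ _ _ _ hpair (by intro p hp; cases hp)]
  have hperm : (PySem.List.sorted (ballots.filterMap List.head?) (fun x => x) false).Perm
      (ballots.filterMap List.head?) :=
    PySem.List.sorted_perm (ballots.filterMap List.head?) (fun x => x) false
  have hcount := hperm.count_eq c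
  by_cases hc : c ∈ PySem.List.sorted (ballots.filterMap List.head?) (fun x => x) false
  · simp [hc, hcount]
  · have hz : (ballots.filterMap List.head?).count c = 0 := by
      rw [← hcount]; exact List.count_eq_zero_of_not_mem hc
    simp [hc, hz]

-- ===== VERDICT (by name: the statement is the Claim_ definition above) =====
theorem calculate_fptp_spec : Claim_equal_calculate_fptp := by
  intro ballots candidates _ _
  show calculate_fptp ballots candidates = calculate_fptp_alt ballots candidates
  unfold calculate_fptp calculate_fptp_alt
  dsimp only
  have hbody : (fun (d : PySem.Dict String Int) c =>
        d.insert c ((PySem.Dict.counter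
          (ballots.foldl (fun acc ballot => if ballot ≠ [] then acc ++ [ballot.headD ""] else acc) [])).getD c 0))
      = (fun (d : PySem.Dict String Int) c =>
        d.insert c ((pvRunsGo
          (PySem.List.sorted
            (ballots.foldl (fun acc b => if b ≠ [] then acc ++ [b.headD ""] else acc) [])
            (fun x => x) false)
          PySem.Dict.empty none 0).getD c 0)) := by
    funext d c
    rw [pvValue_eq]
  rw [hbody]
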